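-- pv_equiv track=rewrite | github.com/xu1998hz/BPO | inference/inference.py | prompt_batchify
-- ===== SOURCE A (Python) =====
-- from typing import TypeVar, Iterable, List
--
-- T = TypeVar('T')
--
-- def prompt_batchify(data: Iterable[T], batch_size: int) -> Iterable[List[T]]:
--     assert batch_size > 0
--
--     batch = []
--     for item in data:
--         # Yield next batch
--         if len(batch) == batch_size:
--             yield batch
--             batch = []
--
--         batch.append(f"SUBREDDIT: {item['subreddit']}\nPOST: {item['content']}\nPlease summarize the post by given subreddit: ")
--
--     # Yield last un-filled batch
--     if len(batch) != 0:
--         yield batch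
-- ===== SOURCE B (Python) =====
-- def prompt_batchify(data, batch_size):
--     assert batch_size > 0
--
--     # Format everything up front, then peel fixed-size slices off the front.
--     prompts = [f"SUBREDDIT: {item['subreddit']}\nPOST: {item['content']}\nPlease summarize the post by given subreddit: "
--                for item in data]
--     while prompts:
--         yield prompts[:batch_size]
--         prompts = prompts[batch_size:]
-- ===== Notes on version B (the rewrite author's own statement) =====
-- stated objective: simpler
-- what changed: B formats all prompts in one comprehension and then slices fixed-size chunks off the front, instead of A's single pass with a buffer and length-counter bookkeeping.
import Mathlib
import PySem

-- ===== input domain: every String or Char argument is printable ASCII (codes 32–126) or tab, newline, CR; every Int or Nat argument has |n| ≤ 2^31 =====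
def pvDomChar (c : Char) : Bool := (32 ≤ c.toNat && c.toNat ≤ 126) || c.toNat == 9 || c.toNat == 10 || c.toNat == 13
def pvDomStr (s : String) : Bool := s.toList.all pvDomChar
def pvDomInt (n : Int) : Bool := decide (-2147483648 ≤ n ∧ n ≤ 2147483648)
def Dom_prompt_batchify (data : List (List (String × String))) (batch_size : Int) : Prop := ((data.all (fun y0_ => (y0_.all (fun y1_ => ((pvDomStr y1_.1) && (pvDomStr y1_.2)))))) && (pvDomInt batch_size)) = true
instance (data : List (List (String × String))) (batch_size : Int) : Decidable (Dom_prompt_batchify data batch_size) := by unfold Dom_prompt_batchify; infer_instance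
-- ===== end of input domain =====

-- B formats all prompts once, then slices fixed-size chunks off the front, replacing
-- A's buffer-and-length-counter accumulation (objective: simpler; return value only —
-- both Pythons are generators and are compared as the list of yielded batches).


-- ===== PORT A =====
-- f"SUBREDDIT: {item['subreddit']}\nPOST: {item['content']}\n…": dict lookup is first
-- match (List.lookup); a missing key is a Python KeyError, excluded by Pre_ below.
def pvFmt (item : List (String × String)) : String :=
  "SUBREDDIT: " ++ (item.lookup "subreddit").getD "" ++ "\nPOST: " ++
    (item.lookup "content").getD "" ++ "\nPlease summarize the post by given subreddit: "

-- A's loop: test len(batch) == batch_size, yield and reset, then append.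
def pvLoopA (bs : Int) : List (List (String × String)) → List String → List (List String)
  | [], batch => if batch.length ≠ 0 then [batch] else []
  | item :: rest, batch =>
      if (batch.length : Int) = bs then
        batch :: pvLoopA bs rest [pvFmt item]
      else
        pvLoopA bs rest (batch ++ [pvFmt item])

def prompt_batchify (data : List (List (String × String))) (batch_size : Int) : List (List String) :=
  pvLoopA batch_size data []

-- ===== PORT B =====
-- B's while-loop: yield prompts[:batch_size], continue with prompts[batch_size:]
-- (slice evaluated on the nonempty list as head :: take/drop, which gives termination).
def pvChunksB (n : Nat) : List String → List (List String)
  | [] => []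
  | x :: xs => (x :: xs.take (n - 1)) :: pvChunksB n (xs.drop (n - 1))
  termination_by l => l.length
  decreasing_by simp

def prompt_batchify_alt (data : List (List (String × String))) (batch_size : Int) : List (List String) :=
  if batch_size ≤ 0 then []   -- assert batch_size > 0: Python raises here (outside Pre_)
  else pvChunksB batch_size.toNat (data.map pvFmt)

-- ===== PRECONDITION & SPEC =====
-- Pre_ excludes exactly the inputs on which the Python raises: batch_size ≤ 0
-- (AssertionError) and items missing a 'subreddit' or 'content' key (KeyError).
def Pre_prompt_batchify (data : List (List (String × String))) (batch_size : Int) : Prop :=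
  0 < batch_size ∧ ∀ item ∈ data,
    (item.lookup "subreddit").isSome ∧ (item.lookup "content").isSome
instance (data : List (List (String × String))) (batch_size : Int) : Decidable (Pre_prompt_batchify data batch_size) := by unfold Pre_prompt_batchify; infer_instance

def pvWitness_prompt_batchify : (List (List (String × String))) × Int :=
  ([[("subreddit", "cats"), ("content", "a post")], [("subreddit", "dogs"), ("content", "b")]], 1)

def Spec_prompt_batchify (data : List (List (String × String))) (batch_size : Int) (out : List (List String)) : Prop := out = prompt_batchify_alt data batch_size
instance (data : List (List (String × String))) (batch_size : Int) (out : List (List String)) : Decidable (Spec_prompt_batchify data batch_size out) := by unfold Spec_prompt_batchify; infer_instance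

-- ===== CLAIM (what is proved, stated in full; the proofs are below) =====
def Claim_equal_prompt_batchify : Prop := ∀ (data : List (List (String × String))) (batch_size : Int), Dom_prompt_batchify data batch_size → Pre_prompt_batchify data batch_size → Spec_prompt_batchify data batch_size (prompt_batchify data batch_size)

-- ===== LEMMAS AND PROOFS =====

lemma pvChunksB_nil (n : Nat) : pvChunksB n [] = [] := by rw [pvChunksB]

lemma pvChunksB_cons (n : Nat) (x : String) (xs : List String) :
    pvChunksB n (x :: xs) = (x :: xs.take (n - 1)) :: pvChunksB n (xs.drop (n - 1)) := by
  rw [pvChunksB]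

-- A's loop, run with a nonempty buffer of length ≤ n, produces the buffer filled to n
-- followed by B's chunks of the remainder.
lemma pvLoopA_eq_chunks (n : Nat) (hn : 1 ≤ n) :
    ∀ (l : List (List (String × String))) (batch : List String),
      1 ≤ batch.length → batch.length ≤ n →
      pvLoopA (n : Int) l batch =
        (batch ++ (l.map pvFmt).take (n - batch.length)) ::
          pvChunksB n ((l.map pvFmt).drop (n - batch.length)) := by
  intro l
  induction l with
  | nil =>
    intro batch h1 _
    have hb : batch.length ≠ 0 := by omega
    simp [pvLoopA, hb, pvChunksB_nil]
  | cons item rest ih =>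
    intro batch h1 h2
    by_cases h : batch.length = n
    · have : ((batch.length : Int) = (n : Int)) := by exact_mod_cast h
      simp only [pvLoopA, if_pos this]
      rw [ih [pvFmt item] (by simp) (by simpa using hn)]
      simp [h, pvChunksB_cons]
    · have hlt : batch.length < n := lt_of_le_of_ne h2 h
      have : ¬ ((batch.length : Int) = (n : Int)) := by exact_mod_cast h
      simp only [pvLoopA, if_neg this]
      rw [ih (batch ++ [pvFmt item]) (by simp) (by simp; omega)]
      have hk : n - batch.length = (n - (batch ++ [pvFmt item]).length) + 1 := by
        simp; omega
      simp [hk, List.take_succ_cons, List.drop_succ_cons]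

-- ===== VERDICT (by name: the statement is the Claim_ definition above) =====
theorem prompt_batchify_spec : Claim_equal_prompt_batchify := by
  intro data batch_size _ hpre
  obtain ⟨hbs, -⟩ := hpre
  unfold Spec_prompt_batchify prompt_batchify prompt_batchify_alt
  rw [if_neg (by omega)]
  obtain ⟨n, rfl⟩ : ∃ n : Nat, batch_size = (n : Int) :=
    ⟨batch_size.toNat, (Int.toNat_of_nonneg (le_of_lt hbs)).symm⟩
  have hn : 1 ≤ n := by exact_mod_cast hbs
  cases data with
  | nil => simp [pvLoopA, pvChunksB_nil]
  | cons item rest =>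
    have h0 : ¬ (((([] : List String).length : Int)) = (n : Int)) := by
      simp; omega
    simp only [pvLoopA, if_neg h0, List.nil_append]
    rw [pvLoopA_eq_chunks n hn rest [pvFmt item] (by simp) (by simpa using hn)]
    simp [pvChunksB_cons]
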